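-- pv_equiv track=rewrite | github.com/Spyrx4/gadget_solution | ai-service/app/services/internet_search_agent.py | rank_search_results
-- ===== SOURCE A (Python) =====
-- from typing import List, Dict, Optional
--
-- TRUSTED_DOMAINS = [
--     "gsmarena.com", "notebookcheck.net", "rtings.com",
--     "techpowerup.com", "tomshardware.com", "anandtech.com",
--     "tokopedia.com", "shopee.co.id", "jagatreview.com",
--     "pricebook.co.id", "gadgetren.com", "gizmologi.id",
-- ]
--
-- def rank_search_results(results: List[Dict]) -> List[Dict]:
--     """Rank search results by relevance, prioritizing trusted domains."""
--     def score(result: Dict) -> int: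
--         url = result.get("url", "").lower()
--         s = 0
--         for domain in TRUSTED_DOMAINS:
--             if domain in url:
--                 s += 10
--                 break
--         # Penalize very short snippets
--         snippet = result.get("snippet", "")
--         if len(snippet) > 100:
--             s += 3
--         return s
--
--     return sorted(results, key=score, reverse=True)
-- ===== SOURCE B (Python) =====
-- TRUSTED_DOMAINS = [
--     "gsmarena.com", "notebookcheck.net", "rtings.com",
--     "techpowerup.com", "tomshardware.com", "anandtech.com",
--     "tokopedia.com", "shopee.co.id", "jagatreview.com",
--     "pricebook.co.id", "gadgetren.com", "gizmologi.id",
-- ]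
--
-- def rank_search_results(results):
--     """Single-pass bucket distribution instead of a comparison sort: the score
--     can only be 13, 10, 3 or 0, so append each result to its score bucket and
--     concatenate the buckets in descending score order (within-bucket order =
--     input order, which matches the stable reverse sort)."""
--     def score(result):
--         url = result.get("url", "").lower()
--         s = 10 if any(domain in url for domain in TRUSTED_DOMAINS) else 0
--         if len(result.get("snippet", "")) > 100:
--             s += 3
--         return s
--
--     b13, b10, b3, b0 = [], [], [], []
--     for result in results:
--         s = score(result)
--         if s == 13:
--             b13.append(result)
--         elif s == 10:
--             b10.append(result)
--         elif s == 3: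
--             b3.append(result)
--         else:
--             b0.append(result)
--     return b13 + b10 + b3 + b0
-- ===== Notes on version B (the rewrite author's own statement) =====
-- stated objective: alternative
-- what changed: Replaces sorted(results, key=score, reverse=True) with a single-pass distribution of results into the four possible score buckets (13/10/3/0), concatenated in descending score order; within-bucket input order reproduces the stable sort's tie order.
import Mathlib
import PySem

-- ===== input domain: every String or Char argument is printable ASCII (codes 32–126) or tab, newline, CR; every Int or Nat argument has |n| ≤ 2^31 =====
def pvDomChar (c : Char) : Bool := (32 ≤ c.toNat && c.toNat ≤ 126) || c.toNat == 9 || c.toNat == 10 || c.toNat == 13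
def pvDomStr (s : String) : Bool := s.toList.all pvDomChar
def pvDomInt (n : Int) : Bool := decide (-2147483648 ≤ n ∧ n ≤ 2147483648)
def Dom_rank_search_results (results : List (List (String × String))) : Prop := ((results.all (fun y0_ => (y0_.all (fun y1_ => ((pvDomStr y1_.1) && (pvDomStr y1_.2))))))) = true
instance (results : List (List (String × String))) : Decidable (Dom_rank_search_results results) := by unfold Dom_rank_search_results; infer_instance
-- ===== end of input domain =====

-- B replaces A's comparison sort by a single-pass distribution into the four
-- possible score buckets (13/10/3/0), concatenated in descending score order
-- (objective: alternative decomposition; stability holds by construction).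

def TRUSTED_DOMAINS : List String :=
  ["gsmarena.com", "notebookcheck.net", "rtings.com",
   "techpowerup.com", "tomshardware.com", "anandtech.com",
   "tokopedia.com", "shopee.co.id", "jagatreview.com",
   "pricebook.co.id", "gadgetren.com", "gizmologi.id"]

-- ===== PORT A =====
-- A's inner 'for domain in TRUSTED_DOMAINS: if domain in url: s += 10; break'
-- as structural recursion over the domain list.
def scoreDomainLoop (url : String) : List String → Int
  | [] => 0
  | d :: ds => if PySem.Str.isIn d url then 10 else scoreDomainLoop url ds

def scoreA (result : List (String × String)) : Int :=
  let url := PySem.Str.lower (PySem.Dict.getD (PySem.Dict.mk result) "url" "")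
  let s := scoreDomainLoop url TRUSTED_DOMAINS
  let snippet := PySem.Dict.getD (PySem.Dict.mk result) "snippet" ""
  if PySem.Str.len snippet > 100 then s + 3 else s

def rank_search_results (results : List (List (String × String))) : List (List (String × String)) :=
  PySem.List.sorted results scoreA true

-- ===== PORT B =====
-- B's score helper ('10 if any(...) else 0', then the snippet bonus)
def scoreB (result : List (String × String)) : Int :=
  let url := PySem.Str.lower (PySem.Dict.getD (PySem.Dict.mk result) "url" "")
  let s : Int := if TRUSTED_DOMAINS.any (fun domain => PySem.Str.isIn domain url) then 10 else 0
  if PySem.Str.len (PySem.Dict.getD (PySem.Dict.mk result) "snippet" "") > 100 then s + 3 else s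

-- B's loop body: append the result to its score bucket
def bucketStep (acc : List (List (String × String)) × List (List (String × String)) ×
    List (List (String × String)) × List (List (String × String)))
    (result : List (String × String)) :
    List (List (String × String)) × List (List (String × String)) ×
    List (List (String × String)) × List (List (String × String)) :=
  let s := scoreB result
  if s == 13 then (acc.1 ++ [result], acc.2.1, acc.2.2.1, acc.2.2.2)
  else if s == 10 then (acc.1, acc.2.1 ++ [result], acc.2.2.1, acc.2.2.2)
  else if s == 3 then (acc.1, acc.2.1, acc.2.2.1 ++ [result], acc.2.2.2)
  else (acc.1, acc.2.1, acc.2.2.1, acc.2.2.2 ++ [result])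

def rank_search_results_alt (results : List (List (String × String))) : List (List (String × String)) :=
  let t := results.foldl bucketStep ([], [], [], [])
  t.1 ++ t.2.1 ++ t.2.2.1 ++ t.2.2.2

-- ===== PRECONDITION & SPEC =====
def Spec_rank_search_results (results : List (List (String × String))) (out : List (List (String × String))) : Prop := out = rank_search_results_alt results
instance (results : List (List (String × String))) (out : List (List (String × String))) : Decidable (Spec_rank_search_results results out) := by unfold Spec_rank_search_results; infer_instance

-- ===== CLAIM (what is proved, stated in full; the proofs are below) =====
def Claim_equal_rank_search_results : Prop := ∀ (results : List (List (String × String))), Dom_rank_search_results results → Spec_rank_search_results results (rank_search_results results)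

-- ===== LEMMAS AND PROOFS =====

-- the domain loop with break equals the 'any' form
lemma scoreDomainLoop_eq_any (url : String) (ds : List String) :
    scoreDomainLoop url ds = if ds.any (fun d => PySem.Str.isIn d url) then 10 else 0 := by
  induction ds with
  | nil => rfl
  | cons d ds ih =>
    simp only [scoreDomainLoop, List.any_cons]
    by_cases h : PySem.Str.isIn d url = true
    · rw [if_pos h, if_pos (show _ = true by rw [h, Bool.true_or])]
    · rw [if_neg h, ih]
      exact if_congr (by rw [Bool.eq_false_iff.mpr h, Bool.false_or]) rfl rfl

-- the two score computations agree
lemma score_eq (r : List (String × String)) : scoreA r = scoreB r := by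
  simp only [scoreA, scoreB, scoreDomainLoop_eq_any]

-- the score takes only the four values 13, 10, 3, 0
lemma scoreB_cases (r : List (String × String)) :
    scoreB r = 13 ∨ scoreB r = 10 ∨ scoreB r = 3 ∨ scoreB r = 0 := by
  unfold scoreB
  dsimp only
  split_ifs <;> omega

-- insertBy skips a prefix it does not go before
lemma insertBy_append_left {α : Type} (before : α → α → Bool) (x : α) (A rest : List α)
    (hA : ∀ a ∈ A, before x a = false) :
    PySem.List.insertBy before x (A ++ rest) = A ++ PySem.List.insertBy before x rest := by
  induction A with
  | nil => simp
  | cons a A ih =>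
    have ha : before x a = false := hA a (by simp)
    simp [PySem.List.insertBy, ha, ih (fun b hb => hA b (by simp [hb]))]

-- insertBy lands exactly between the ≥-prefix and the <-suffix
lemma insertBy_split {α : Type} (before : α → α → Bool) (x : α) (A rest : List α)
    (hA : ∀ a ∈ A, before x a = false) (hrest : ∀ b ∈ rest, before x b = true) :
    PySem.List.insertBy before x (A ++ rest) = A ++ x :: rest := by
  rw [insertBy_append_left before x A rest hA]
  cases rest with
  | nil => simp [PySem.List.insertBy]
  | cons h t => simp [PySem.List.insertBy, hrest h (by simp)]

-- main invariant: inserting into a bucket-concatenated accumulator appends to the right bucket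
lemma main_inv (xs : List (List (String × String))) :
    ∀ A B C D : List (List (String × String)),
      (∀ a ∈ A, scoreB a = 13) → (∀ a ∈ B, scoreB a = 10) →
      (∀ a ∈ C, scoreB a = 3) → (∀ a ∈ D, scoreB a = 0) →
      xs.foldl (fun acc x => PySem.List.insertBy (fun a b => decide (scoreA b < scoreA a)) x acc)
          (A ++ B ++ C ++ D)
        = (fun t => t.1 ++ t.2.1 ++ t.2.2.1 ++ t.2.2.2) (xs.foldl bucketStep (A, B, C, D)) := by
  induction xs with
  | nil => intro A B C D _ _ _ _; simp
  | cons x xs ih =>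
    intro A B C D hA hB hC hD
    simp only [List.foldl_cons]
    rcases scoreB_cases x with hs | hs | hs | hs
    · -- score 13
      have hins : PySem.List.insertBy (fun a b => decide (scoreA b < scoreA a)) x
          (A ++ B ++ C ++ D) = (A ++ [x]) ++ B ++ C ++ D := by
        have := insertBy_split (fun a b => decide (scoreA b < scoreA a)) x A (B ++ C ++ D)
          (fun a ha => by simp [score_eq, hs, hA a ha])
          (fun b hb => by
            simp only [List.mem_append] at hb
            rcases hb with (h | h) | h
            · simp [score_eq, hs, hB _ h]
            · simp [score_eq, hs, hC _ h]
            · simp [score_eq, hs, hD _ h])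
        simpa [List.append_assoc] using this
      rw [hins, show bucketStep (A, B, C, D) x = (A ++ [x], B, C, D) by
        simp [bucketStep, hs]]
      exact ih (A ++ [x]) B C D
        (fun a ha => by
          rcases List.mem_append.mp ha with h | h
          · exact hA a h
          · simp at h; subst h; exact hs) hB hC hD
    · -- score 10
      have hins : PySem.List.insertBy (fun a b => decide (scoreA b < scoreA a)) x
          (A ++ B ++ C ++ D) = A ++ (B ++ [x]) ++ C ++ D := by
        have := insertBy_split (fun a b => decide (scoreA b < scoreA a)) x (A ++ B) (C ++ D)
          (fun a ha => by
            rcases List.mem_append.mp ha with h | h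
            · simp [score_eq, hs, hA a h]
            · simp [score_eq, hs, hB a h])
          (fun b hb => by
            rcases List.mem_append.mp hb with h | h
            · simp [score_eq, hs, hC _ h]
            · simp [score_eq, hs, hD _ h])
        simpa [List.append_assoc] using this
      rw [hins, show bucketStep (A, B, C, D) x = (A, B ++ [x], C, D) by
        simp [bucketStep, hs]]
      exact ih A (B ++ [x]) C D hA
        (fun a ha => by
          rcases List.mem_append.mp ha with h | h
          · exact hB a h
          · simp at h; subst h; exact hs) hC hD
    · -- score 3
      have hins : PySem.List.insertBy (fun a b => decide (scoreA b < scoreA a)) x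
          (A ++ B ++ C ++ D) = A ++ B ++ (C ++ [x]) ++ D := by
        have := insertBy_split (fun a b => decide (scoreA b < scoreA a)) x (A ++ B ++ C) D
          (fun a ha => by
            simp only [List.mem_append] at ha
            rcases ha with (h | h) | h
            · simp [score_eq, hs, hA a h]
            · simp [score_eq, hs, hB a h]
            · simp [score_eq, hs, hC a h])
          (fun b hb => by simp [score_eq, hs, hD _ hb])
        simpa [List.append_assoc] using this
      rw [hins, show bucketStep (A, B, C, D) x = (A, B, C ++ [x], D) by
        simp [bucketStep, hs]]
      exact ih A B (C ++ [x]) D hA hB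
        (fun a ha => by
          rcases List.mem_append.mp ha with h | h
          · exact hC a h
          · simp at h; subst h; exact hs) hD
    · -- score 0
      have hins : PySem.List.insertBy (fun a b => decide (scoreA b < scoreA a)) x
          (A ++ B ++ C ++ D) = A ++ B ++ C ++ (D ++ [x]) := by
        have := PySem.List.insertBy_of_forall_not_before
          (fun a b => decide (scoreA b < scoreA a)) x (A ++ B ++ C ++ D)
          (fun a ha => by
            simp only [List.mem_append] at ha
            rcases ha with ((h | h) | h) | h
            · simp [score_eq, hs, hA _ h]
            · simp [score_eq, hs, hB _ h]
            · simp [score_eq, hs, hC _ h]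
            · simp [score_eq, hs, hD _ h])
        simpa [List.append_assoc] using this
      rw [hins, show bucketStep (A, B, C, D) x = (A, B, C, D ++ [x]) by
        simp [bucketStep, hs]]
      exact ih A B C (D ++ [x]) hA hB hC
        (fun a ha => by
          rcases List.mem_append.mp ha with h | h
          · exact hD a h
          · simp at h; subst h; exact hs)

-- ===== VERDICT (by name: the statement is the Claim_ definition above) =====
theorem rank_search_results_spec : Claim_equal_rank_search_results := by
  intro results _
  show rank_search_results results = rank_search_results_alt results
  unfold rank_search_results rank_search_results_alt
  rw [PySem.List.sorted_rev_eq_foldl_insertBy]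
  simpa using main_inv results [] [] [] []
    (by simp) (by simp) (by simp) (by simp)
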